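-- pv_equiv track=rewrite | github.com/avihay30/PythonProjects | Python_practices/Exam_Practices/Exams/example_exam_1.py | long_colored
-- ===== SOURCE A (Python) =====
-- def long_colored(string):
--     counter = 0
--     index_of_longest = 0
--     maximum_seq = 0
--     for i in range(len(string) - 1):
--         if string[i] == string[i + 1]:
--             counter += 1
--         else:
--             if maximum_seq < counter:
--                 maximum_seq = counter
--                 index_of_longest = i - maximum_seq
--             counter = 0
--     if maximum_seq < counter:
--         maximum_seq = counter
--         index_of_longest = len(string) - 1 - maximum_seq
--     return index_of_longest
-- ===== SOURCE B (Python) =====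
-- def long_colored(string):
--     n = len(string)
--     best_len = 0
--     best_idx = 0
--     i = 0
--     while i < n:
--         j = i + 1
--         while j < n and string[j] == string[i]:
--             j += 1
--         if j - i - 1 > best_len:
--             best_len = j - i - 1
--             best_idx = i
--         i = j
--     return best_idx
-- ===== Notes on version B (the rewrite author's own statement) =====
-- stated objective: alternative
-- what changed: B jumps run by run with a nested two-pointer while loop that measures each maximal equal-char run directly, instead of A's single index loop counting equal adjacent pairs with a deferred flush of the counter at run breaks and after the loop.
import Mathlib
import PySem

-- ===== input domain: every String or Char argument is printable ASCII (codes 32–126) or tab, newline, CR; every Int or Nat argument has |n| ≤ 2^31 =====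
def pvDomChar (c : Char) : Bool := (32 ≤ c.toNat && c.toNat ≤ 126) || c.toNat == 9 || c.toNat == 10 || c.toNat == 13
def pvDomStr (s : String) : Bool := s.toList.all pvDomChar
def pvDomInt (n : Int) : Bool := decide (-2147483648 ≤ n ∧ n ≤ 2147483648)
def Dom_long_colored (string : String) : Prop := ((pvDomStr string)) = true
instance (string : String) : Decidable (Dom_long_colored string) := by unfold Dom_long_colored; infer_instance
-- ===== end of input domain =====

-- B scans the string run by run (two pointers jumping over each maximal equal-char run)
-- instead of A's per-index pair counting with deferred flush; objective: alternative (same O(n) cost).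

-- ===== PORT A =====
-- A's for-loop over range(len(string)-1) with state (counter, index_of_longest, maximum_seq)
def aLoop (l : List Char) (i : Nat) (counter index_of_longest maximum_seq : Int) :
    Int × Int × Int :=
  if h : i + 1 < l.length then
    if l[i] = l[i + 1] then
      aLoop l (i + 1) (counter + 1) index_of_longest maximum_seq
    else
      if maximum_seq < counter then
        aLoop l (i + 1) 0 ((i : Int) - counter) counter
      else
        aLoop l (i + 1) 0 index_of_longest maximum_seq
  else (counter, index_of_longest, maximum_seq)
termination_by l.length - i

def long_colored (string : String) : Int :=
  let l := string.toList
  let st := aLoop l 0 0 0 0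
  if st.2.2 < st.1 then (l.length : Int) - 1 - st.1 else st.2.1

-- ===== PORT B =====
-- B's inner while loop: advance j past the run of character c
def runEnd (l : List Char) (c : Char) (j : Nat) : Nat :=
  if h : j < l.length then
    if l[j] = c then runEnd l c (j + 1) else j
  else j
termination_by l.length - j

theorem runEnd_ge (l : List Char) (c : Char) (j : Nat) : j ≤ runEnd l c j := by
  unfold runEnd
  split
  · split
    · exact le_trans (Nat.le_succ j) (runEnd_ge l c (j + 1))
    · exact le_refl j
  · exact le_refl j
termination_by l.length - j

-- B's outer while loop (the inner-loop result j written inline)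
def bLoop (l : List Char) (i : Nat) (best_len best_idx : Int) : Int :=
  if h : i < l.length then
    if (runEnd l l[i] (i + 1) : Int) - i - 1 > best_len then
      bLoop l (runEnd l l[i] (i + 1)) ((runEnd l l[i] (i + 1) : Int) - i - 1) i
    else
      bLoop l (runEnd l l[i] (i + 1)) best_len best_idx
  else best_idx
termination_by l.length - i
decreasing_by
  all_goals
    have := runEnd_ge l l[i] (i + 1)
    omega

def long_colored_alt (string : String) : Int :=
  bLoop string.toList 0 0 0

-- ===== PRECONDITION & SPEC =====
def Spec_long_colored (string : String) (out : Int) : Prop := out = long_colored_alt string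
instance (string : String) (out : Int) : Decidable (Spec_long_colored string out) := by unfold Spec_long_colored; infer_instance

-- ===== CLAIM (what is proved, stated in full; the proofs are below) =====
def Claim_equal_long_colored : Prop := ∀ (string : String), Dom_long_colored string → Spec_long_colored string (long_colored string)

-- ===== LEMMAS AND PROOFS =====

theorem runEnd_le (l : List Char) (c : Char) (j : Nat) (h : j ≤ l.length) :
    runEnd l c j ≤ l.length := by
  unfold runEnd
  split
  · split
    · exact runEnd_le l c (j + 1) (by omega)
    · exact h
  · exact h
termination_by l.length - j

theorem runEnd_mem (l : List Char) (c : Char) (j : Nat) :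
    ∀ k, j ≤ k → k < runEnd l c j → ∀ (hk : k < l.length), l[k] = c := by
  intro k hjk hkr hk
  unfold runEnd at hkr
  split at hkr
  · split at hkr
    · rcases Nat.eq_or_lt_of_le hjk with rfl | h'
      · assumption
      · exact runEnd_mem l c (j + 1) k h' hkr hk
    · omega
  · omega
termination_by l.length - j

theorem runEnd_end (l : List Char) (c : Char) (j : Nat) :
    ∀ k, runEnd l c j = k → ∀ (hk : k < l.length), l[k] ≠ c := by
  intro k he hk
  rw [runEnd] at he
  split at he
  · split at he
    · exact runEnd_end l c (j + 1) k he hk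
    · subst he; assumption
  · subst he; omega
termination_by l.length - j

-- the in-run part of A's loop: the counter just increments until the run's last index m
theorem aLoop_run (l : List Char) (i m : Nat) (hi : i < l.length) (hm : m < l.length)
    (hrun : ∀ k, i ≤ k → k < m + 1 → ∀ (hk : k < l.length), l[k] = l[i]'hi) :
    ∀ (k : Nat), i ≤ k → k ≤ m → ∀ idx mx : Int,
      aLoop l k ((k : Int) - i) idx mx = aLoop l m ((m : Int) - i) idx mx
  | k, hik, hkm, idx, mx => by
    rcases Nat.eq_or_lt_of_le hkm with rfl | hlt
    · rfl
    · have hkn : k + 1 < l.length := by omega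
      rw [aLoop, dif_pos hkn]
      have h1 : l[k] = l[i]'hi := hrun k hik (by omega) (by omega)
      have h2 : l[k + 1] = l[i]'hi := hrun (k + 1) (by omega) (by omega) hkn
      rw [if_pos (h1.trans h2.symm)]
      have harith : (k : Int) - i + 1 = ((k + 1 : Nat) : Int) - i := by push_cast; ring
      rw [harith]
      exact aLoop_run l i m hi hm hrun (k + 1) (by omega) (by omega) idx mx
termination_by k _ _ _ _ => m - k

-- main correspondence: from any position i, A's remaining loop plus final flush equals B's loop
theorem main_lemma (l : List Char) (fuel : Nat) :
    ∀ i idx mx, l.length - i ≤ fuel → 0 ≤ mx →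
      (if (aLoop l i 0 idx mx).2.2 < (aLoop l i 0 idx mx).1
        then (l.length : Int) - 1 - (aLoop l i 0 idx mx).1
        else (aLoop l i 0 idx mx).2.1)
      = bLoop l i mx idx := by
  induction fuel with
  | zero =>
    intro i idx mx hf hmx
    have hin : ¬ i < l.length := by omega
    have hin1 : ¬ i + 1 < l.length := by omega
    rw [bLoop, dif_neg hin, aLoop, dif_neg hin1]
    exact if_neg (not_lt.mpr hmx)
  | succ fuel ih =>
    intro i idx mx hf hmx
    by_cases hin : i < l.length
    · rw [bLoop, dif_pos hin]
      have hji : i + 1 ≤ runEnd l (l[i]'hin) (i + 1) := runEnd_ge l (l[i]'hin) (i + 1)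
      have hjn : runEnd l (l[i]'hin) (i + 1) ≤ l.length :=
        runEnd_le l (l[i]'hin) (i + 1) (by omega)
      obtain ⟨m, hg⟩ : ∃ m, runEnd l (l[i]'hin) (i + 1) = m + 1 :=
        ⟨runEnd l (l[i]'hin) (i + 1) - 1, by omega⟩
      rw [hg]
      have him : i ≤ m := by omega
      have hm : m < l.length := by omega
      have hrun : ∀ k, i ≤ k → k < m + 1 → ∀ (hk : k < l.length), l[k] = l[i]'hin := by
        intro k hik hkj hk
        rcases Nat.eq_or_lt_of_le hik with rfl | h'
        · rfl
        · exact runEnd_mem l (l[i]'hin) (i + 1) k h' (by omega) hk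
      have hstep := aLoop_run l i m hin hm hrun i (le_refl i) him idx mx
      have hz : (i : Int) - i = 0 := by ring
      rw [hz] at hstep
      rw [hstep]
      by_cases hjend : m + 1 < l.length
      · -- the run ends with an unequal adjacent pair (m, m+1)
        have hne : ¬ l[m] = l[m + 1] := by
          intro h
          have h1 : l[m] = l[i]'hin := hrun m him (by omega) hm
          have h2 : l[m + 1] ≠ l[i]'hin := runEnd_end l (l[i]'hin) (i + 1) (m + 1) hg hjend
          exact h2 (h.symm.trans h1)
        rw [aLoop, dif_pos hjend, if_neg hne]
        by_cases hcmp : mx < (m : Int) - i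
        · rw [if_pos hcmp, if_pos (show ((m + 1 : Nat) : Int) - i - 1 > mx by push_cast; omega)]
          rw [show (m : Int) - ((m : Int) - i) = (i : Int) by ring]
          rw [show ((m + 1 : Nat) : Int) - i - 1 = (m : Int) - i by push_cast; ring]
          exact ih (m + 1) (i : Int) ((m : Int) - i) (by omega) (by omega)
        · rw [if_neg hcmp, if_neg (show ¬ ((m + 1 : Nat) : Int) - i - 1 > mx by push_cast; omega)]
          exact ih (m + 1) idx mx (by omega) hmx
      · -- the run reaches the end of the string: counter = m - i at exit, flushed after the loop
        rw [aLoop, dif_neg (show ¬ m + 1 < l.length from hjend)]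
        have hlen : l.length = m + 1 := by omega
        by_cases hcmp : mx < (m : Int) - i
        · rw [if_pos hcmp, if_pos (show ((m + 1 : Nat) : Int) - i - 1 > mx by push_cast; omega)]
          rw [bLoop, dif_neg (by omega : ¬ m + 1 < l.length)]
          rw [hlen]; push_cast; ring
        · rw [if_neg hcmp, if_neg (show ¬ ((m + 1 : Nat) : Int) - i - 1 > mx by push_cast; omega)]
          rw [bLoop, dif_neg (by omega : ¬ m + 1 < l.length)]
    · have hin1 : ¬ i + 1 < l.length := by omega
      rw [bLoop, dif_neg hin, aLoop, dif_neg hin1]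
      exact if_neg (not_lt.mpr hmx)

-- ===== VERDICT (by name: the statement is the Claim_ definition above) =====
theorem long_colored_spec : Claim_equal_long_colored := by
  intro string _
  unfold Spec_long_colored long_colored long_colored_alt
  exact main_lemma string.toList string.toList.length 0 0 0 (by omega) (le_refl 0)
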